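-- pv_equiv track=rewrite | github.com/jfzhouyoo/CR-GIS | CR-GIS/src/dataset_opendialkg.py | unk_mask
-- ===== SOURCE A (Python) =====
-- from copy import deepcopy
-- from copy import deepcopy
--
-- def unk_mask(sentence, length, pad=0, end=2, unk=3):
--     unk_sentence = deepcopy(sentence)
--     length = deepcopy(length)
--     for i, idx in enumerate(sentence):
--         if idx != end:
--             unk_sentence[i] = unk
--         else:
--             break
--     return unk_sentence, length
-- ===== SOURCE B (Python) =====
-- from copy import deepcopy
-- from itertools import accumulate
-- from operator import or_
--
-- def unk_mask(sentence, length, pad=0, end=2, unk=3):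
--     length = deepcopy(length)
--     # inclusive cumulative OR of "token == end": position i keeps its token
--     # exactly when an end token occurs at or before i
--     seen = accumulate((tok == end for tok in sentence), or_)
--     unk_sentence = [tok if s else unk for tok, s in zip(sentence, seen)]
--     return unk_sentence, length
-- ===== Notes on version B (the rewrite author's own statement) =====
-- stated objective: alternative
-- what changed: B replaces A's mutate-until-break loop over a deep copy by two staged passes: a cumulative-OR mask of 'end seen so far' built with itertools.accumulate, then a zip-map that chooses unk or the original token independently per position.
import Mathlib
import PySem

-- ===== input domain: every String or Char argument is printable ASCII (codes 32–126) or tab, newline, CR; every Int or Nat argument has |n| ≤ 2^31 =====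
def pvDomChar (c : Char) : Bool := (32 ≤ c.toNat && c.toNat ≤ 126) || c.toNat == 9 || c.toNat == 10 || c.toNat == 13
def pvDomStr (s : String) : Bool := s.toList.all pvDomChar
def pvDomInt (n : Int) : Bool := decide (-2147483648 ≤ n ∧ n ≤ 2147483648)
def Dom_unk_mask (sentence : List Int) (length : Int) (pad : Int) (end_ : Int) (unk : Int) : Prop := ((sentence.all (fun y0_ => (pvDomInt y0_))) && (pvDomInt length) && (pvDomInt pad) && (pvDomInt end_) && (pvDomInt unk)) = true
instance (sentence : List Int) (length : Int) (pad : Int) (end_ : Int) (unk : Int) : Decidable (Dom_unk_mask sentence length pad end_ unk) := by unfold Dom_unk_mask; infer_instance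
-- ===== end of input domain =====

-- B builds a cumulative-OR "end seen" mask and zip-maps it over the sentence, instead of A's mutate-until-break loop (alternative decomposition; return value only).
-- ===== PORT A =====
-- the for-loop with break: mask each token until the first end token, then keep the rest unchanged
def unkLoopA (end_ unk : Int) : List Int → List Int
  | [] => []
  | x :: xs => if x ≠ end_ then unk :: unkLoopA end_ unk xs else x :: xs

def unk_mask (sentence : List Int) (length : Int) (pad : Int) (end_ : Int) (unk : Int) : List Int × Int :=
  (unkLoopA end_ unk sentence, length)

-- ===== PORT B =====
-- itertools.accumulate((tok == end for tok in sentence), or_): inclusive running OR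
def accumOrGo (end_ : Int) (a : Bool) : List Int → List Bool
  | [] => [a]
  | y :: ys => a :: accumOrGo end_ (a || (y == end_)) ys

def accumOr (end_ : Int) : List Int → List Bool
  | [] => []
  | x :: xs => accumOrGo end_ (x == end_) xs

def unk_mask_alt (sentence : List Int) (length : Int) (pad : Int) (end_ : Int) (unk : Int) : List Int × Int :=
  let seen := accumOr end_ sentence
  ((sentence.zip seen).map (fun p => if p.2 then p.1 else unk), length)

-- ===== PRECONDITION & SPEC =====
def Spec_unk_mask (sentence : List Int) (length : Int) (pad : Int) (end_ : Int) (unk : Int) (out : List Int × Int) : Prop := out = unk_mask_alt sentence length pad end_ unk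
instance (sentence : List Int) (length : Int) (pad : Int) (end_ : Int) (unk : Int) (out : List Int × Int) : Decidable (Spec_unk_mask sentence length pad end_ unk out) := by unfold Spec_unk_mask; infer_instance

-- ===== CLAIM (what is proved, stated in full; the proofs are below) =====
def Claim_equal_unk_mask : Prop := ∀ (sentence : List Int) (length : Int) (pad : Int) (end_ : Int) (unk : Int), Dom_unk_mask sentence length pad end_ unk → Spec_unk_mask sentence length pad end_ unk (unk_mask sentence length pad end_ unk)

-- ===== LEMMAS AND PROOFS =====
theorem accumOrGo_true (end_ : Int) (ys : List Int) :
    accumOrGo end_ true ys = List.replicate (ys.length + 1) true := by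
  induction ys with
  | nil => simp [accumOrGo]
  | cons y ys ih => simp [accumOrGo, ih, List.replicate_succ]

theorem zip_replicate_true (unk : Int) (xs : List Int) :
    (xs.zip (List.replicate xs.length true)).map
      (fun p : Int × Bool => if p.2 then p.1 else unk) = xs := by
  induction xs with
  | nil => simp
  | cons x xs ih => simpa [List.replicate_succ] using ih

theorem unkLoopA_eq (end_ unk : Int) (sentence : List Int) :
    unkLoopA end_ unk sentence =
      (sentence.zip (accumOr end_ sentence)).map (fun p => if p.2 then p.1 else unk) := by
  induction sentence with
  | nil => simp [unkLoopA, accumOr]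
  | cons x xs ih =>
    by_cases hx : x = end_
    · subst hx
      simp [unkLoopA, accumOr, accumOrGo_true, List.zip_cons_cons,
        List.replicate_succ, zip_replicate_true]
    · have hxe : (x == end_) = false := by simp [hx]
      rw [unkLoopA, if_pos hx, ih]
      cases xs with
      | nil => simp [accumOr, accumOrGo, hxe]
      | cons y ys => simp [accumOr, accumOrGo, hxe]

-- ===== VERDICT (by name: the statement is the Claim_ definition above) =====
theorem unk_mask_spec : Claim_equal_unk_mask := by
  intro sentence length pad end_ unk _
  unfold Spec_unk_mask unk_mask unk_mask_alt
  simp only [unkLoopA_eq]
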